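-- pv_equiv track=rewrite | github.com/hanzhenzhujene/ConfessionAI | src/offtherails_pilot/dataset_checks.py | evaluate_analysis_profile
-- ===== SOURCE A (Python) =====
-- from typing import Dict, List
--
-- def summarize_binary_balance(items: List[Dict[str, str]]) -> Dict[str, int]:
--     return {
--         "perm_pos": sum(row.get("gold_perm_binary", "") == "1" for row in items),
--         "perm_neg": sum(row.get("gold_perm_binary", "") == "0" for row in items),
--         "perm_amb": sum(row.get("binary_eval_perm", "") == "0" for row in items),
--         "intent_pos": sum(row.get("gold_intent_binary", "") == "1" for row in items),
--         "intent_neg": sum(row.get("gold_intent_binary", "") == "0" for row in items),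
--         "intent_amb": sum(row.get("binary_eval_intent", "") == "0" for row in items),
--     }
--
-- def evaluate_analysis_profile(items: List[Dict[str, str]], analysis_profile: str) -> List[str]:
--     if not items:
--         return ["Items file is empty."]
--
--     issues: List[str] = []
--     scales = {row.get("gold_scale_max", "") for row in items}
--     balance = summarize_binary_balance(items)
--
--     if analysis_profile == "binary_primary":
--         if scales != {"5"}:
--             issues.append(
--                 "Binary-primary runs require benchmark-aligned 1-5 ratings in the items file."
--             )
--         if balance["perm_pos"] == 0 or balance["perm_neg"] == 0:
--             issues.append(
--                 "Permissibility gold labels are one-sided, so binary self-correction on permissibility is not paper-safe."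
--             )
--         if balance["intent_pos"] == 0 or balance["intent_neg"] == 0:
--             issues.append(
--                 "Intention gold labels are one-sided, so binary self-correction on intention is not paper-safe."
--             )
--         if balance["perm_pos"] < 10 or balance["perm_neg"] < 10:
--             issues.append(
--                 "Permissibility does not have at least 10 positive and 10 negative gold items."
--             )
--         if balance["intent_pos"] < 10 or balance["intent_neg"] < 10:
--             issues.append(
--                 "Intention does not have at least 10 positive and 10 negative gold items."
--             )
--     elif analysis_profile == "continuous_primary":
--         if scales != {"5"}:
--             issues.append(
--                 "This run uses an adapted rating scale rather than the benchmark-aligned 1-5 scale."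
--             )
--     else:
--         issues.append(f"Unknown analysis profile: {analysis_profile}")
--
--     return issues
-- ===== SOURCE B (Python) =====
-- from typing import Dict, List
--
-- def evaluate_analysis_profile(items: List[Dict[str, str]], analysis_profile: str) -> List[str]:
--     if not items:
--         return ["Items file is empty."]
--
--     perm_pos = perm_neg = intent_pos = intent_neg = 0
--     all_five = True
--     for row in items:
--         if row.get("gold_scale_max", "") != "5":
--             all_five = False
--         p = row.get("gold_perm_binary", "")
--         if p == "1":
--             perm_pos += 1
--         elif p == "0":
--             perm_neg += 1
--         q = row.get("gold_intent_binary", "")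
--         if q == "1":
--             intent_pos += 1
--         elif q == "0":
--             intent_neg += 1
--
--     issues: List[str] = []
--     if analysis_profile == "binary_primary":
--         if not all_five:
--             issues.append(
--                 "Binary-primary runs require benchmark-aligned 1-5 ratings in the items file."
--             )
--         if perm_pos == 0 or perm_neg == 0:
--             issues.append(
--                 "Permissibility gold labels are one-sided, so binary self-correction on permissibility is not paper-safe."
--             )
--         if intent_pos == 0 or intent_neg == 0:
--             issues.append(
--                 "Intention gold labels are one-sided, so binary self-correction on intention is not paper-safe."
--             )
--         if perm_pos < 10 or perm_neg < 10:
--             issues.append(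
--                 "Permissibility does not have at least 10 positive and 10 negative gold items."
--             )
--         if intent_pos < 10 or intent_neg < 10:
--             issues.append(
--                 "Intention does not have at least 10 positive and 10 negative gold items."
--             )
--     elif analysis_profile == "continuous_primary":
--         if not all_five:
--             issues.append(
--                 "This run uses an adapted rating scale rather than the benchmark-aligned 1-5 scale."
--             )
--     else:
--         issues.append(f"Unknown analysis profile: {analysis_profile}")
--
--     return issues
-- ===== Notes on version B (the rewrite author's own statement) =====
-- stated objective: simpler
-- what changed: Replaced the helper with six sum() passes plus a set comprehension by a single fused loop maintaining four counters and an all_five flag (the set is never materialised; the unused perm_amb/intent_amb counts are dropped), followed by the same threshold branches.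
import Mathlib
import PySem

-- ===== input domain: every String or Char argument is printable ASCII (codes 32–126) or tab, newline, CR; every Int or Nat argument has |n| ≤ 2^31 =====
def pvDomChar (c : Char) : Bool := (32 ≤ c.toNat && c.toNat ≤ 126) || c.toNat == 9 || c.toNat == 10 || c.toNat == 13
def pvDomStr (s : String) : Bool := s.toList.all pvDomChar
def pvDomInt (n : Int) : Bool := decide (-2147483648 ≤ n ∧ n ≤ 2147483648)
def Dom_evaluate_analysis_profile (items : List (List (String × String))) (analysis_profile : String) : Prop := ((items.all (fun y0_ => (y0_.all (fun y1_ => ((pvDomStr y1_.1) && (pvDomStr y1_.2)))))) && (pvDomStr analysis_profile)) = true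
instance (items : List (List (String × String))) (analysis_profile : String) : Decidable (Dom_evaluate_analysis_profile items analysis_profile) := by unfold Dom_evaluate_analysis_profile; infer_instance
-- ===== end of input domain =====

-- B fuses A's six sum() passes and set comprehension into one loop with four counters and an all_five flag (simpler; same thresholds and messages).

-- ===== PORT A =====
-- row.get(k, "") on a Python dict given as an assoc list (duplicates: last wins, as dict(pairs))
def pvRowGet (row : List (String × String)) (k : String) : String :=
  (PySem.Dict.ofList row).getD k ""

-- literal port of summarize_binary_balance (dict of six 0/1-sums)
def summarize_binary_balance (items : List (List (String × String))) : PySem.Dict String Int :=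
  ((((((PySem.Dict.empty.insert "perm_pos"
      ((items.map (fun row => if pvRowGet row "gold_perm_binary" = "1" then (1 : Int) else 0)).sum)).insert "perm_neg"
      ((items.map (fun row => if pvRowGet row "gold_perm_binary" = "0" then (1 : Int) else 0)).sum)).insert "perm_amb"
      ((items.map (fun row => if pvRowGet row "binary_eval_perm" = "0" then (1 : Int) else 0)).sum)).insert "intent_pos"
      ((items.map (fun row => if pvRowGet row "gold_intent_binary" = "1" then (1 : Int) else 0)).sum)).insert "intent_neg"
      ((items.map (fun row => if pvRowGet row "gold_intent_binary" = "0" then (1 : Int) else 0)).sum)).insert "intent_amb"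
      ((items.map (fun row => if pvRowGet row "binary_eval_intent" = "0" then (1 : Int) else 0)).sum))

def evaluate_analysis_profile (items : List (List (String × String))) (analysis_profile : String) : List String :=
  if items = [] then ["Items file is empty."]
  else
    let issues : List String := []
    let scales : PySem.Set String := PySem.Set.ofList (items.map (fun row => pvRowGet row "gold_scale_max"))
    let balance := summarize_binary_balance items
    -- balance["k"]: the six keys are always present, so getD is exact here
    if analysis_profile = "binary_primary" then
      let issues := if PySem.Set.equal scales ["5"] = false then issues ++ ["Binary-primary runs require benchmark-aligned 1-5 ratings in the items file."] else issues
      let issues := if balance.getD "perm_pos" 0 = 0 ∨ balance.getD "perm_neg" 0 = 0 then issues ++ ["Permissibility gold labels are one-sided, so binary self-correction on permissibility is not paper-safe."] else issues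
      let issues := if balance.getD "intent_pos" 0 = 0 ∨ balance.getD "intent_neg" 0 = 0 then issues ++ ["Intention gold labels are one-sided, so binary self-correction on intention is not paper-safe."] else issues
      let issues := if balance.getD "perm_pos" 0 < 10 ∨ balance.getD "perm_neg" 0 < 10 then issues ++ ["Permissibility does not have at least 10 positive and 10 negative gold items."] else issues
      let issues := if balance.getD "intent_pos" 0 < 10 ∨ balance.getD "intent_neg" 0 < 10 then issues ++ ["Intention does not have at least 10 positive and 10 negative gold items."] else issues
      issues
    else if analysis_profile = "continuous_primary" then
      let issues := if PySem.Set.equal scales ["5"] = false then issues ++ ["This run uses an adapted rating scale rather than the benchmark-aligned 1-5 scale."] else issues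
      issues
    else
      issues ++ ["Unknown analysis profile: " ++ analysis_profile]

-- ===== PORT B =====
-- loop state: (perm_pos, perm_neg, intent_pos, intent_neg, all_five)
def pvStep (acc : Int × Int × Int × Int × Bool) (row : List (String × String)) : Int × Int × Int × Int × Bool :=
  let (pp, pn, ip, im, af) := acc
  let af := if pvRowGet row "gold_scale_max" ≠ "5" then false else af
  let p := pvRowGet row "gold_perm_binary"
  let (pp, pn) := if p = "1" then (pp + 1, pn) else if p = "0" then (pp, pn + 1) else (pp, pn)
  let q := pvRowGet row "gold_intent_binary"
  let (ip, im) := if q = "1" then (ip + 1, im) else if q = "0" then (ip, im + 1) else (ip, im)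
  (pp, pn, ip, im, af)

def evaluate_analysis_profile_alt (items : List (List (String × String))) (analysis_profile : String) : List String :=
  if items = [] then ["Items file is empty."]
  else
    let (pp, pn, ip, im, af) := items.foldl pvStep (0, 0, 0, 0, true)
    let issues : List String := []
    if analysis_profile = "binary_primary" then
      let issues := if af = false then issues ++ ["Binary-primary runs require benchmark-aligned 1-5 ratings in the items file."] else issues
      let issues := if pp = 0 ∨ pn = 0 then issues ++ ["Permissibility gold labels are one-sided, so binary self-correction on permissibility is not paper-safe."] else issues
      let issues := if ip = 0 ∨ im = 0 then issues ++ ["Intention gold labels are one-sided, so binary self-correction on intention is not paper-safe."] else issues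
      let issues := if pp < 10 ∨ pn < 10 then issues ++ ["Permissibility does not have at least 10 positive and 10 negative gold items."] else issues
      let issues := if ip < 10 ∨ im < 10 then issues ++ ["Intention does not have at least 10 positive and 10 negative gold items."] else issues
      issues
    else if analysis_profile = "continuous_primary" then
      let issues := if af = false then issues ++ ["This run uses an adapted rating scale rather than the benchmark-aligned 1-5 scale."] else issues
      issues
    else
      issues ++ ["Unknown analysis profile: " ++ analysis_profile]

-- ===== PRECONDITION & SPEC =====
def Spec_evaluate_analysis_profile (items : List (List (String × String))) (analysis_profile : String) (out : List String) : Prop := out = evaluate_analysis_profile_alt items analysis_profile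
instance (items : List (List (String × String))) (analysis_profile : String) (out : List String) : Decidable (Spec_evaluate_analysis_profile items analysis_profile out) := by unfold Spec_evaluate_analysis_profile; infer_instance

-- ===== CLAIM (what is proved, stated in full; the proofs are below) =====
def Claim_equal_evaluate_analysis_profile : Prop := ∀ (items : List (List (String × String))) (analysis_profile : String), Dom_evaluate_analysis_profile items analysis_profile → Spec_evaluate_analysis_profile items analysis_profile (evaluate_analysis_profile items analysis_profile)

-- ===== LEMMAS AND PROOFS =====

-- B's loop computes A's four used 0/1-sums and the conjunction of the scale checks
set_option maxHeartbeats 1000000 in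
theorem pvStep_foldl (items : List (List (String × String))) (pp pn ip im : Int) (af : Bool) :
    items.foldl pvStep (pp, pn, ip, im, af) =
      (pp + (items.map (fun row => if pvRowGet row "gold_perm_binary" = "1" then (1 : Int) else 0)).sum,
       pn + (items.map (fun row => if pvRowGet row "gold_perm_binary" = "0" then (1 : Int) else 0)).sum,
       ip + (items.map (fun row => if pvRowGet row "gold_intent_binary" = "1" then (1 : Int) else 0)).sum,
       im + (items.map (fun row => if pvRowGet row "gold_intent_binary" = "0" then (1 : Int) else 0)).sum,
       af && items.all (fun row => pvRowGet row "gold_scale_max" = "5")) := by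
  induction items generalizing pp pn ip im af with
  | nil => simp
  | cons r t ih =>
    simp only [List.foldl_cons, List.map_cons, List.sum_cons, List.all_cons, pvStep]
    split_ifs <;> rw [ih] <;> clear ih <;> simp only [Prod.mk.injEq] <;> and_intros <;>
      first | ring1 | simp_all

-- the set comprehension equals {"5"} iff every (nonempty) row has gold_scale_max "5"
theorem pvScales_eq (items : List (List (String × String))) (h : items ≠ []) :
    PySem.Set.equal (PySem.Set.ofList (items.map (fun row => pvRowGet row "gold_scale_max"))) ["5"]
      = items.all (fun row => pvRowGet row "gold_scale_max" = "5") := by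
  rcases items with _ | ⟨r, t⟩
  · exact absurd rfl h
  · by_cases hall : (r :: t).all (fun row => pvRowGet row "gold_scale_max" = "5") = true
    · rw [hall]
      rw [PySem.Set.equal_iff]
      intro x
      simp only [PySem.Set.mem_ofList, List.mem_map, List.mem_singleton]
      simp only [List.all_eq_true, decide_eq_true_eq] at hall
      constructor
      · rintro ⟨row, hrow, rfl⟩; exact hall row hrow
      · rintro rfl; exact ⟨r, List.mem_cons_self .., hall r (List.mem_cons_self ..)⟩
    · simp only [Bool.not_eq_true] at hall
      rw [hall]
      apply Bool.eq_false_iff.mpr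
      intro heq
      rw [PySem.Set.equal_iff] at heq
      obtain ⟨row, hrow, hne⟩ := List.all_eq_false.mp hall
      simp only [decide_eq_true_eq] at hne
      have hmem : pvRowGet row "gold_scale_max" ∈ PySem.Set.ofList ((r :: t).map (fun row => pvRowGet row "gold_scale_max")) :=
        (PySem.Set.mem_ofList _ _).mpr (List.mem_map.mpr ⟨row, hrow, rfl⟩)
      have h5 := (heq _).mp hmem
      simp only [List.mem_singleton] at h5
      exact hne h5

-- ===== VERDICT (by name: the statement is the Claim_ definition above) =====
theorem evaluate_analysis_profile_spec : Claim_equal_evaluate_analysis_profile := by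
  intro items prof _
  unfold Spec_evaluate_analysis_profile evaluate_analysis_profile evaluate_analysis_profile_alt
  by_cases h : items = []
  · simp [h]
  · simp only [if_neg h]
    rw [pvStep_foldl, pvScales_eq items h]
    simp [summarize_binary_balance, PySem.Dict.getD_insert, pvRowGet]
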